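-- pv_equiv track=rewrite | github.com/jkomkov/bulla | tests/test_hierarchical.py | _partition_meet
-- ===== SOURCE A (Python) =====
-- def _partition_meet(P, Q):
--     """Meet (greatest lower bound) of two partitions: intersect all pairs."""
--     result = []
--     for p in P:
--         for q in Q:
--             inter = p & q
--             if inter:
--                 result.append(inter)
--     return result
-- ===== SOURCE B (Python) =====
-- def _partition_meet(P, Q):
--     """Meet of two partitions: index each element by its Q-blocks, then bucket
--     every p's elements per Q-block instead of intersecting all pairs."""
--     where = {}
--     for j, q in enumerate(Q):
--         for x in q:
--             where.setdefault(x, []).append(j)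
--     result = []
--     for p in P:
--         buckets = [set() for _ in Q]
--         for x in p:
--             for j in where.get(x, ()):
--                 buckets[j].add(x)
--         for b in buckets:
--             if b:
--                 result.append(b)
--     return result
-- ===== Notes on version B (the rewrite author's own statement) =====
-- stated objective: faster
-- what changed: Instead of intersecting every p with every q, B builds once a dict mapping each element to the indices of the Q-blocks containing it, then for each p buckets its elements by Q-block index and emits the non-empty buckets in index order.
import Mathlib
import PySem

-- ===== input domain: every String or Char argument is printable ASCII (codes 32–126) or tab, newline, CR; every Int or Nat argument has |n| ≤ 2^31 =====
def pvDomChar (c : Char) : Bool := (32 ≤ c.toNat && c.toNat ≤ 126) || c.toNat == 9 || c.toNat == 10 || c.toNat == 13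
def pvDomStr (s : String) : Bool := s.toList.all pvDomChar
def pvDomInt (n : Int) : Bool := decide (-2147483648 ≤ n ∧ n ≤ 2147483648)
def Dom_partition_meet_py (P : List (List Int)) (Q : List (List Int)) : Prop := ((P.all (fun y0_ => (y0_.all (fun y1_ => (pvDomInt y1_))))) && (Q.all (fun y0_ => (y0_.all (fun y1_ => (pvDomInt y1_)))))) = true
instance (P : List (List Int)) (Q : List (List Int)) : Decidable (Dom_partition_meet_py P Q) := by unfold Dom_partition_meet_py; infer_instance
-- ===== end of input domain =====

-- B replaces A's all-pairs set intersections by an element→Q-block index built once,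
-- bucketing each p's elements per Q-block.

-- ===== PORT A =====
def partition_meet_py (P : List (List Int)) (Q : List (List Int)) : List (List Int) :=
  P.foldl (fun result p =>
    Q.foldl (fun result q =>
      let inter := PySem.Set.inter (PySem.Set.ofList p) (PySem.Set.ofList q)
      if inter ≠ [] then result ++ [inter] else result) result) []

-- ===== PORT B =====
-- B-side helper: the 'where' dict (element -> list of indices of Q-blocks containing it)
def pvWh (Q : List (List Int)) : PySem.Dict Int (List Int) :=
  (PySem.List.enumerate Q).foldl
    (fun d jq => jq.2.foldl (fun d x => d.modify x [] (fun v => v ++ [jq.1])) d)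
    PySem.Dict.empty

def partition_meet_py_alt (P : List (List Int)) (Q : List (List Int)) : List (List Int) :=
  let wh := pvWh Q
  P.foldl (fun result p =>
    let buckets :=
      p.foldl
        (fun bs x => (wh.getD x []).foldl
          (fun bs j => bs.modify j.toNat (fun s => PySem.Set.add s x)) bs)
        (Q.map (fun _ => (PySem.Set.empty : PySem.Set Int)))
    buckets.foldl (fun result b => if b ≠ [] then result ++ [b] else result) result) []

-- ===== PRECONDITION & SPEC =====
def Spec_partition_meet_py (P : List (List Int)) (Q : List (List Int)) (out : List (List Int)) : Prop := out = partition_meet_py_alt P Q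
instance (P : List (List Int)) (Q : List (List Int)) (out : List (List Int)) : Decidable (Spec_partition_meet_py P Q out) := by unfold Spec_partition_meet_py; infer_instance

-- ===== CLAIM (what is proved, stated in full; the proofs are below) =====
def Claim_equal_partition_meet_py : Prop := ∀ (P : List (List Int)) (Q : List (List Int)), Dom_partition_meet_py P Q → Spec_partition_meet_py P Q (partition_meet_py P Q)

-- ===== LEMMAS AND PROOFS =====

-- proof-only abbreviation: A's inner intersection
def pvI (p q : List Int) : PySem.Set Int :=
  PySem.Set.inter (PySem.Set.ofList p) (PySem.Set.ofList q)

lemma pvWh_flat (l : List (Int × List Int)) (d : PySem.Dict Int (List Int)) :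
    l.foldl (fun d jq => jq.2.foldl (fun d x => d.modify x [] (fun v => v ++ [jq.1])) d) d
    = (l.flatMap (fun jq => jq.2.map (fun x => (x, jq.1)))).foldl
        (fun d p => d.modify p.1 [] (fun v => v ++ [p.2])) d := by
  induction l generalizing d with
  | nil => rfl
  | cons jq t ih => simp [List.flatMap_cons, List.foldl_append, List.foldl_map, ih]

lemma pvWh_getD (Q : List (List Int)) (x : Int) :
    (pvWh Q).getD x []
    = ((PySem.List.enumerate Q).flatMap (fun jq => jq.2.map (fun y => (y, jq.1)))
        |>.filter (fun p => p.1 == x)).map (·.2) := by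
  unfold pvWh
  rw [pvWh_flat, PySem.Dict.getD_foldl_modify_append]
  rfl

lemma pvWh_mem (Q : List (List Int)) (x j : Int) :
    j ∈ (pvWh Q).getD x [] ↔ ∃ k : Nat, ∃ h : k < Q.length, j = (k : Int) ∧ x ∈ Q[k] := by
  rw [pvWh_getD]
  simp only [List.mem_map, List.mem_filter, List.mem_flatMap, PySem.List.mem_enumerate_iff]
  constructor
  · rintro ⟨p, ⟨⟨jq, ⟨⟨k, hk, rfl⟩, y, hy, rfl⟩⟩, hx⟩, rfl⟩
    simp only [beq_iff_eq] at hx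
    exact ⟨k, hk, by simpa using hx ▸ hy⟩
  · rintro ⟨k, hk, rfl, hx⟩
    exact ⟨(x, (k : Int)), ⟨⟨((k : Int), Q[k]), ⟨k, hk, by simp⟩, x, hx, rfl⟩, by simp⟩, rfl⟩

lemma pvWh_nonneg (Q : List (List Int)) (x : Int) : ∀ j ∈ (pvWh Q).getD x [], 0 ≤ j := by
  intro j hj
  rcases (pvWh_mem Q x j).1 hj with ⟨k, hk, rfl, _⟩
  positivity

-- fold of modifies over an index list, read pointwise
lemma pv_fold_modify_getElem (js : List Int) (x : Int) (bs : List (PySem.Set Int)) (k : Nat)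
    (hnn : ∀ j ∈ js, 0 ≤ j) :
    (js.foldl (fun bs j => bs.modify j.toNat (fun s => PySem.Set.add s x)) bs)[k]?
    = if (k : Int) ∈ js then bs[k]?.map (fun s => PySem.Set.add s x) else bs[k]? := by
  induction js generalizing bs with
  | nil => simp
  | cons j t ih =>
    have hj : 0 ≤ j := hnn j (by simp)
    rw [List.foldl_cons, ih _ (fun j hj => hnn j (by simp [hj]))]
    by_cases hk : (k : Int) = j
    · have hkt : j.toNat = k := by omega
      have hmod : (bs.modify j.toNat (fun s => PySem.Set.add s x))[k]?
          = bs[k]?.map (fun s => PySem.Set.add s x) := by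
        simp [hkt]
      by_cases hmem : (k : Int) ∈ t
      · rw [if_pos hmem, hmod, if_pos (by simp [hk])]
        cases bs[k]? with
        | none => rfl
        | some s =>
          simp
      · rw [if_neg hmem, hmod, if_pos (by simp [hk])]
    · have hne : j.toNat ≠ k := by omega
      simp only [List.getElem?_modify, hne, if_false]
      by_cases hmem : (k : Int) ∈ t
      · rw [if_pos hmem, if_pos (by simp [hmem])]
        cases bs[k]? <;> rfl
      · rw [if_neg hmem, if_neg (by simp [hk, hmem])]
        cases bs[k]? <;> simp

-- one step of the bucket loop turns pvI r · into pvI (r ++ [x]) ·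
lemma pvI_step (r : List Int) (x : Int) (q : List Int) :
    pvI (r ++ [x]) q = if x ∈ q then PySem.Set.add (pvI r q) x else pvI r q := by
  have hofa : PySem.Set.ofList (r ++ [x]) = PySem.Set.add (PySem.Set.ofList r) x := by
    simp [PySem.Set.ofList, List.foldl_append]
  unfold pvI
  rw [hofa]
  by_cases hm : x ∈ PySem.Set.ofList r
  · rw [PySem.Set.add_of_mem hm]
    by_cases hq : x ∈ q
    · rw [if_pos hq, PySem.Set.add_of_mem]
      simp [PySem.Set.inter, List.mem_filter, hm, PySem.Set.mem_ofList, hq]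
    · rw [if_neg hq]
  · rw [PySem.Set.add_of_not_mem hm]
    simp only [PySem.Set.inter, List.filter_append, List.filter_cons, List.filter_nil]
    by_cases hq : x ∈ q
    · rw [if_pos hq]
      rw [PySem.Set.add_of_not_mem (by simp [List.mem_filter, hm])]
      simp [PySem.Set.mem_ofList, hq]
    · rw [if_neg hq]
      simp [PySem.Set.mem_ofList, hq]

lemma pv_buckets_spec (Q : List (List Int)) (p : List Int) : ∀ r : List Int,
    p.foldl
      (fun bs x => ((pvWh Q).getD x []).foldl
        (fun bs j => bs.modify j.toNat (fun s => PySem.Set.add s x)) bs)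
      (Q.map (fun q => pvI r q))
    = Q.map (fun q => pvI (r ++ p) q) := by
  induction p with
  | nil => simp
  | cons x t ih =>
    intro r
    rw [List.foldl_cons]
    have hstep :
        ((pvWh Q).getD x []).foldl
          (fun bs j => bs.modify j.toNat (fun s => PySem.Set.add s x))
          (Q.map (fun q => pvI r q))
        = Q.map (fun q => pvI (r ++ [x]) q) := by
      apply List.ext_getElem?
      intro k
      rw [pv_fold_modify_getElem _ _ _ _ (pvWh_nonneg Q x)]
      by_cases hk : k < Q.length
      · have hmem : ((k : Int) ∈ (pvWh Q).getD x []) ↔ x ∈ Q[k] := by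
          rw [pvWh_mem]
          constructor
          · rintro ⟨k', hk', hkk, hx⟩
            have : k' = k := by omega
            subst this; exact hx
          · intro hx; exact ⟨k, hk, rfl, hx⟩
        by_cases hx : x ∈ Q[k]
        · rw [if_pos (hmem.2 hx)]
          simp [List.getElem?_eq_getElem hk, pvI_step, hx]
        · rw [if_neg (fun h => hx (hmem.1 h))]
          simp [List.getElem?_eq_getElem hk, pvI_step, hx]
      · have h1 : (Q.map (fun q => pvI r q))[k]? = none := by
          simp [le_of_not_gt hk]
        have h2 : (Q.map (fun q => pvI (r ++ [x]) q))[k]? = none := by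
          simp [le_of_not_gt hk]
        have hnm : ¬ ((k : Int) ∈ (pvWh Q).getD x []) := by
          rw [pvWh_mem]
          rintro ⟨k', hk', hkk, _⟩
          omega
        rw [if_neg hnm, h1, h2]
    rw [hstep, ih (r ++ [x])]
    simp

-- ===== VERDICT (by name: the statement is the Claim_ definition above) =====
theorem partition_meet_py_spec : Claim_equal_partition_meet_py := by
  intro P Q _
  show partition_meet_py P Q = partition_meet_py_alt P Q
  simp only [partition_meet_py, partition_meet_py_alt]
  congr 1
  funext result p
  have hinit : Q.map (fun _ => (PySem.Set.empty : PySem.Set Int))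
      = Q.map (fun q => pvI [] q) := by
    apply List.map_congr_left
    intro q _
    rfl
  have hb :
      p.foldl
        (fun bs x => ((pvWh Q).getD x []).foldl
          (fun bs j => bs.modify j.toNat (fun s => PySem.Set.add s x)) bs)
        (Q.map (fun _ => (PySem.Set.empty : PySem.Set Int)))
      = Q.map (fun q => pvI p q) := by
    rw [hinit, pv_buckets_spec Q p []]
    simp
  rw [hb, List.foldl_map]
  rfl
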